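-- pv_equiv track=rewrite | github.com/jonwashburn/collatz | tools/certificate/windows.py | solve_residue
-- ===== SOURCE A (Python) =====
-- from typing import Iterable, Iterator, List, Sequence
--
-- def solve_residue(pattern: Sequence[int]) -> tuple[int, int]:
--     """Return (r mod 2^{K+1}, K) satisfying the congruences for the pattern."""
--     K_t = 0
--     c_t = 0
--     r_mod = 0
--     for idx, s_val in enumerate(pattern):
--         K_next = K_t + s_val
--         modulus = 1 << (K_next + 1)
--         rhs = (- (3 * c_t + (1 << K_t)) + (1 << K_next)) % modulus
--         inv = pow(3, -(idx + 1), modulus)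
--         r_mod = (inv * rhs) % modulus
--         c_t = 3 * c_t + (1 << K_t)
--         K_t = K_next
--     return r_mod, K_t
-- ===== SOURCE B (Python) =====
-- def solve_residue(pattern):
--     """Return (r mod 2^{K+1}, K) satisfying the congruences for the pattern."""
--     if not pattern:
--         return (0, 0)
--     K = 0
--     c = 0
--     for s_val in pattern:
--         c = 3 * c + (1 << K)
--         K += s_val
--     mod = 1 << (K + 1)
--     r = (pow(3, -len(pattern), mod) * ((1 << K) - c)) % mod
--     return (r, K)
-- ===== Notes on version B (the rewrite author's own statement) =====
-- stated objective: simpler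
-- what changed: B keeps only the running exponent K and folded constant c in the loop and computes the residue once at the end with a single modular inverse, instead of recomputing a modular inverse and overwriting r_mod on every iteration.
import Mathlib
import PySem

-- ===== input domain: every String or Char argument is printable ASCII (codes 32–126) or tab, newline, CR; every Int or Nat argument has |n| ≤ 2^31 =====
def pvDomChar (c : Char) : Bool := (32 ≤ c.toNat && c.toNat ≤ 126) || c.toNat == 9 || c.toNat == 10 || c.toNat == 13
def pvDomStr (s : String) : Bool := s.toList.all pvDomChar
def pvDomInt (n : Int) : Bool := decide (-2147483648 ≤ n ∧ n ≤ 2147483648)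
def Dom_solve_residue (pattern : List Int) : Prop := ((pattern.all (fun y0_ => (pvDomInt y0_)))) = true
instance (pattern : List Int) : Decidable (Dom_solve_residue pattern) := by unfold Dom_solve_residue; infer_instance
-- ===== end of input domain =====

-- B is simpler: one pass keeping only (K, c) and a single modular inverse at the end,
-- instead of a fresh inverse and a repeatedly overwritten r_mod every iteration.

-- ===== PORT A =====
-- pow(3, -n, m): modular inverse of 3 mod m (m a power of two here, gcd = 1),
-- raised to n and reduced mod m; ported via Mathlib's extended gcd (Int.gcdA).
def pyPow3Neg (n : Nat) (m : Int) : Int := ((Int.gcdA 3 m) % m) ^ n % m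

-- the for-loop of A, state (idx, K_t, c_t, r_mod)
def solveLoopA : List Int → Nat → Int → Int → Int → Int × Int
  | [], _, K_t, _, r_mod => (r_mod, K_t)
  | s_val :: rest, idx, K_t, c_t, _ =>
      let K_next := K_t + s_val
      let modulus : Int := 2 ^ (K_next + 1).toNat
      let rhs := (-(3 * c_t + 2 ^ K_t.toNat) + 2 ^ K_next.toNat) % modulus
      let inv := pyPow3Neg (idx + 1) modulus
      solveLoopA rest (idx + 1) K_next (3 * c_t + 2 ^ K_t.toNat) ((inv * rhs) % modulus)

def solve_residue (pattern : List Int) : Int × Int :=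
  solveLoopA pattern 0 0 0 0

-- ===== PORT B =====
-- B's for-loop: state (K, c)
def solveFoldB : List Int → Int → Int → Int × Int
  | [], K, c => (K, c)
  | s_val :: rest, K, c => solveFoldB rest (K + s_val) (3 * c + 2 ^ K.toNat)

def solve_residue_alt (pattern : List Int) : Int × Int :=
  if pattern = [] then (0, 0)
  else
    let Kc := solveFoldB pattern 0 0
    let md : Int := 2 ^ (Kc.1 + 1).toNat
    let r := (pyPow3Neg pattern.length md * (2 ^ Kc.1.toNat - Kc.2)) % md
    (r, Kc.1)

-- ===== PRECONDITION & SPEC =====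
-- Python A raises ValueError ('negative shift count') exactly when some nonempty
-- prefix of pattern has a negative sum; Pre_ excludes exactly those inputs.
def Pre_solve_residue (pattern : List Int) : Prop :=
  ∀ k ∈ List.range pattern.length, 0 ≤ ((pattern.take (k + 1)).sum)
instance (pattern : List Int) : Decidable (Pre_solve_residue pattern) := by
  unfold Pre_solve_residue; infer_instance

def pvWitness_solve_residue : List Int := [2, -1, 3, 0]

def Spec_solve_residue (pattern : List Int) (out : Int × Int) : Prop := out = solve_residue_alt pattern
instance (pattern : List Int) (out : Int × Int) : Decidable (Spec_solve_residue pattern out) := by unfold Spec_solve_residue; infer_instance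

-- ===== CLAIM (what is proved, stated in full; the proofs are below) =====
def Claim_equal_solve_residue : Prop := ∀ (pattern : List Int), Dom_solve_residue pattern → Pre_solve_residue pattern → Spec_solve_residue pattern (solve_residue pattern)

-- ===== LEMMAS AND PROOFS =====

-- On a nonempty suffix, A's loop result is B's closed form over the folded state.
theorem solveLoopA_eq (l : List Int) (hl : l ≠ []) :
    ∀ (idx : Nat) (K c r : Int),
    solveLoopA l idx K c r =
      (let Kc := solveFoldB l K c
       let md : Int := 2 ^ (Kc.1 + 1).toNat
       ((pyPow3Neg (idx + l.length) md * (2 ^ Kc.1.toNat - Kc.2)) % md, Kc.1)) := by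
  induction l with
  | nil => exact absurd rfl hl
  | cons s rest ih =>
    intro idx K c r
    by_cases hr : rest = []
    · subst hr
      simp only [solveLoopA, solveFoldB, List.length_cons, List.length_nil]
      have hmul : ∀ (a b m : Int), (a * (b % m)) % m = (a * b) % m := by
        intro a b m
        conv_lhs => rw [Int.mul_emod, Int.emod_emod_of_dvd b dvd_rfl]
        rw [← Int.mul_emod]
      rw [hmul]
      ring_nf
    · simp only [solveLoopA, solveFoldB]
      rw [ih hr]
      simp only [List.length_cons]
      ring_nf

-- ===== VERDICT (by name: the statement is the Claim_ definition above) =====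
theorem solve_residue_spec : Claim_equal_solve_residue := by
  intro pattern _ _
  unfold Spec_solve_residue solve_residue solve_residue_alt
  by_cases h : pattern = []
  · subst h; rfl
  · rw [solveLoopA_eq pattern h 0 0 0 0]
    simp [h]
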